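-- pv_equiv track=rewrite | github.com/lukerf89/invoice-processor-fn | main.py | extract_quantity_context_lines
-- ===== SOURCE A (Python) =====
-- def extract_quantity_context_lines(text, product_code):
--     """Extract relevant context lines around product code with performance optimization"""
--
--     if not text or not product_code:
--         return []
--
--     # Performance optimization: use find() to quickly locate product code
--     product_pos = text.find(product_code)
--     if product_pos == -1:
--         return []
--
--     lines = text.split("\n")
--     context_lines = []
--
--     # Find the line containing the product code more efficiently
--     for i, line in enumerate(lines):
--         if product_code in line:
--             # Get current line and next several lines for context
--             start_idx = max(0, i)
--             end_idx = min(len(lines), i + 8)  # Up to 8 lines of context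
--             context_lines = lines[start_idx:end_idx]
--             break
--
--     # Filter out empty lines for better processing
--     context_lines = [line.strip() for line in context_lines if line.strip()]
--
--     return context_lines
-- ===== SOURCE B (Python) =====
-- def extract_quantity_context_lines(text, product_code):
--     """Extract context lines around the product code, locating its line by offset arithmetic."""
--     if not text or not product_code:
--         return []
--     pos = text.find(product_code)
--     if pos == -1:
--         return []
--     lines = text.split("\n")
--     line_index = text[:pos].count("\n")
--     # sanity check: a code spanning a line break fits on no single line
--     if product_code not in lines[line_index]:
--         return []
--     return [line.strip() for line in lines[line_index:line_index + 8] if line.strip()]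
-- ===== Notes on version B (the rewrite author's own statement) =====
-- stated objective: alternative
-- what changed: B replaces A's line-by-line membership scan (enumerate + 'in' over every line) by computing the target line index directly from the find() offset as text[:pos].count('\n'), with a single membership sanity check on that one line.
import Mathlib
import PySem

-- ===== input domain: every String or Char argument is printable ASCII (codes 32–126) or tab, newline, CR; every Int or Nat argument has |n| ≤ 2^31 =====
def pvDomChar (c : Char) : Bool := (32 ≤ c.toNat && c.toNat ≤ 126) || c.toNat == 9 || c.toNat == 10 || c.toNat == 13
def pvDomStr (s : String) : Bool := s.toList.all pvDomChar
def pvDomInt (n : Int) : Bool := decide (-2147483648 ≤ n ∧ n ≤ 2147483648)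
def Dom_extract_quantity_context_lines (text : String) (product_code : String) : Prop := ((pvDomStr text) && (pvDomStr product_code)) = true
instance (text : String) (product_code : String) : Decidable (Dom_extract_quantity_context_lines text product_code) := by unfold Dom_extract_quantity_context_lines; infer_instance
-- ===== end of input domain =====

-- B replaces A's line-by-line membership scan by computing the target line index
-- directly from the find() offset (number of newlines before it); alternative decomposition, same results.

-- ===== PORT A =====
-- A's `for i, line in enumerate(lines): if product_code in line: context = lines[max(0,i):min(len,i+8)]; break` loop
def pvAFind (pc : List Char) (all : List (List Char)) : List (Int × List Char) → List (List Char)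
  | [] => []
  | (i, line) :: rest =>
    if PySem.Chars.isIn pc line then
      PySem.List.slice all (some (max 0 i)) (some (min (all.length : Int) (i + 8)))
    else pvAFind pc all rest

def extract_quantity_context_lines (text : String) (product_code : String) : List String :=
  if text = "" ∨ product_code = "" then []
  else
    let product_pos := PySem.Str.find text product_code
    if product_pos = -1 then []
    else
      let lines := PySem.Chars.splitOn text.toList ['\n']
      let context_lines := pvAFind product_code.toList lines (PySem.List.enumerate lines)
      (context_lines.filter (fun line => !(PySem.Chars.strip line).isEmpty)).map
        (fun line => String.ofList (PySem.Chars.strip line))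

-- ===== PORT B =====
def extract_quantity_context_lines_alt (text : String) (product_code : String) : List String :=
  if text = "" ∨ product_code = "" then []
  else
    let pos := PySem.Str.find text product_code
    if pos = -1 then []
    else
      let lines := PySem.Chars.splitOn text.toList ['\n']
      let line_index : Nat := PySem.Chars.count (PySem.Chars.slice text.toList none (some pos)) ['\n']
      -- lines[line_index]: line_index = number of '\n' before pos is always < lines.length, so Python never raises here
      if !(PySem.Chars.isIn product_code.toList (PySem.List.pyGetD lines (line_index : Int) [])) then []
      else
        ((PySem.List.slice lines (some (line_index : Int)) (some ((line_index : Int) + 8))).filter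
          (fun line => !(PySem.Chars.strip line).isEmpty)).map
          (fun line => String.ofList (PySem.Chars.strip line))

-- ===== PRECONDITION & SPEC =====
def Spec_extract_quantity_context_lines (text : String) (product_code : String) (out : List String) : Prop := out = extract_quantity_context_lines_alt text product_code
instance (text : String) (product_code : String) (out : List String) : Decidable (Spec_extract_quantity_context_lines text product_code out) := by unfold Spec_extract_quantity_context_lines; infer_instance

-- ===== CLAIM (what is proved, stated in full; the proofs are below) =====
def Claim_equal_extract_quantity_context_lines : Prop := ∀ (text : String) (product_code : String), Dom_extract_quantity_context_lines text product_code → Spec_extract_quantity_context_lines text product_code (extract_quantity_context_lines text product_code)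

-- ===== LEMMAS AND PROOFS =====

def pvSplit (c : Char) : List Char → List (List Char)
  | [] => [[]]
  | a :: rest => if a = c then [] :: pvSplit c rest else (pvSplit c rest).modifyHead (a :: ·)

theorem pvSplit_ne_nil (c : Char) (cs : List Char) : pvSplit c cs ≠ [] := by
  induction cs with
  | nil => simp [pvSplit]
  | cons a rest ih =>
    simp only [pvSplit]
    split
    · simp
    · intro h; exact ih (by simpa using List.modifyHead_eq_nil_iff.mp h)

theorem splitOn_go_eq (c : Char) (l cur : List Char) (acc : List (List Char)) :
    ∀ fuel, l.length < fuel →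
    PySem.Chars.splitOn.go [c] fuel l cur acc =
      acc.reverse ++ (pvSplit c l).modifyHead (cur.reverse ++ ·) := by
  induction l generalizing cur acc with
  | nil =>
    intro fuel hf
    match fuel, hf with
    | fuel+1, _ => simp [PySem.Chars.splitOn.go, pvSplit]
  | cons a rest ih =>
    intro fuel hf
    match fuel, hf with
    | fuel+1, hf =>
      simp only [PySem.Chars.splitOn.go]
      by_cases hac : a = c
      · subst hac
        rw [if_pos (by simp [List.isPrefixOf])]
        rw [show List.drop [a].length (a :: rest) = rest from rfl]
        rw [ih [] (cur.reverse :: acc) fuel (by simpa using hf)]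
        simp only [pvSplit, List.reverse_cons, List.reverse_nil, List.nil_append, List.append_assoc]
        cases pvSplit a rest <;> simp
      · rw [if_neg (by simp [List.isPrefixOf]; exact fun h => absurd h.symm hac)]
        rw [ih (a :: cur) acc fuel (by simpa using hf)]
        obtain ⟨h, t, hh⟩ : ∃ h t, pvSplit c rest = h :: t := by
          cases hp : pvSplit c rest with
          | nil => exact absurd hp (pvSplit_ne_nil c rest)
          | cons h t => exact ⟨h, t, rfl⟩
        simp [pvSplit, hac, hh]

theorem splitOn_eq_pvSplit (c : Char) (cs : List Char) :
    PySem.Chars.splitOn cs [c] = pvSplit c cs := by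
  have := splitOn_go_eq c cs [] [] (cs.length + 1) (by omega)
  rw [PySem.Chars.splitOn]
  rw [show cs.length + 1 = cs.length + 1 from rfl] at this
  rw [this]
  cases pvSplit c cs <;> simp

theorem count_go_eq (c : Char) (l : List Char) (acc : Nat) :
    ∀ fuel, l.length ≤ fuel →
    PySem.Chars.count.go [c] fuel l acc = acc + l.count c := by
  induction l generalizing acc with
  | nil =>
    intro fuel hf
    cases fuel <;> simp [PySem.Chars.count.go]
  | cons a rest ih =>
    intro fuel hf
    match fuel, hf with
    | fuel+1, hf =>
      simp only [PySem.Chars.count.go]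
      by_cases hac : a = c
      · subst hac
        rw [if_pos (by simp [List.isPrefixOf])]
        rw [show List.drop [a].length (a :: rest) = rest from rfl]
        rw [ih (acc + 1) fuel (by simpa using hf)]
        simp; omega
      · rw [if_neg (by simp [List.isPrefixOf]; exact fun h => absurd h.symm hac)]
        rw [ih acc fuel (by simpa using hf)]
        simp [hac]

theorem count_single (c : Char) (cs : List Char) :
    PySem.Chars.count cs [c] = cs.count c := by
  simpa [PySem.Chars.count] using count_go_eq c cs 0 cs.length le_rfl

theorem pvSplit_no_sep (c : Char) (cs : List Char) :
    ∀ l ∈ pvSplit c cs, c ∉ l := by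
  induction cs with
  | nil => simp [pvSplit]
  | cons a rest ih =>
    simp only [pvSplit]
    split
    · intro l hl
      rw [List.mem_cons] at hl
      rcases hl with hl | hl
      · simp [hl]
      · exact ih l hl
    · rename_i hac
      intro l hl
      cases hp : pvSplit c rest with
      | nil => exact absurd hp (pvSplit_ne_nil c rest)
      | cons h t =>
        rw [hp] at hl
        simp only [List.modifyHead_cons, List.mem_cons] at hl
        rcases hl with hl | hl
        · subst hl
          intro hm
          rw [List.mem_cons] at hm
          rcases hm with hm | hm
          · exact hac hm.symm
          · exact ih h (by simp [hp]) hm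
        · exact ih l (by simp [hp, hl])

theorem length_pvSplit (c : Char) (cs : List Char) :
    (pvSplit c cs).length = cs.count c + 1 := by
  induction cs with
  | nil => simp [pvSplit]
  | cons a rest ih =>
    simp only [pvSplit]
    split
    · rename_i hac; simp [ih, hac]
    · rename_i hac
      rw [List.length_modifyHead, ih]
      have : (a == c) = false := by simp [hac]
      simp [List.count_cons, this]

theorem pvSplit_head (c : Char) (cs : List Char) :
    (pvSplit c cs).getD 0 [] = cs.takeWhile (· ≠ c) := by
  induction cs with
  | nil => simp [pvSplit]
  | cons a rest ih =>
    simp only [pvSplit]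
    split
    · rename_i hac; simp [hac, List.takeWhile]
    · rename_i hac
      cases hp : pvSplit c rest with
      | nil => exact absurd hp (pvSplit_ne_nil c rest)
      | cons h t =>
        rw [hp] at ih
        simp at ih
        simp [List.takeWhile, hac, ← ih]

theorem find_eq_intro (cs pc : List Char) (p : Nat)
    (hpre : pc <+: cs.drop p) (hmin : ∀ i < p, ¬ pc <+: cs.drop i) :
    PySem.Chars.find cs pc = (p : Int) := by
  have hin : PySem.Chars.isIn pc cs = true := by
    rw [← PySem.Chars.exists_prefix_drop_iff_isIn]
    exact ⟨p, hpre⟩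
  have hnn : 0 ≤ PySem.Chars.find cs pc := by
    rw [PySem.Chars.find_nonneg_iff]
    exact (PySem.Chars.isIn_iff_infix pc cs).mp hin
  obtain ⟨hp1, hp2⟩ := PySem.Chars.find_spec hnn
  have : (PySem.Chars.find cs pc).toNat = p := by
    rcases Nat.lt_trichotomy (PySem.Chars.find cs pc).toNat p with h | h | h
    · exact absurd hp1 (hmin _ h)
    · exact h
    · exact absurd hpre (hp2 _ h)
  omega

theorem find_tail (a : Char) (cs pc : List Char) (p : Nat)
    (hnp : ¬ pc <+: (a :: cs)) (h : PySem.Chars.find (a :: cs) pc = (p : Int)) :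
    1 ≤ p ∧ PySem.Chars.find cs pc = ((p - 1 : Nat) : Int) := by
  have hnn : 0 ≤ PySem.Chars.find (a :: cs) pc := by rw [h]; positivity
  obtain ⟨hp1, hp2⟩ := PySem.Chars.find_spec hnn
  rw [h] at hp1 hp2
  simp only [Int.toNat_natCast] at hp1 hp2
  have hp0 : 1 ≤ p := by
    rcases Nat.eq_zero_or_pos p with h0 | h0
    · subst h0; simp at hp1; exact absurd hp1 hnp
    · exact h0
  refine ⟨hp0, find_eq_intro cs pc (p - 1) ?_ ?_⟩
  · have : cs.drop (p - 1) = (a :: cs).drop p := by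
      cases p with
      | zero => omega
      | succ q => simp
    rw [this]; exact hp1
  · intro i hi hpre
    exact hp2 (i + 1) (by omega) (by simpa using hpre)

theorem prefix_takeWhile {pc l : List Char} (c : Char) (hpre : pc <+: l) (hnc : c ∉ pc) :
    pc <+: l.takeWhile (· ≠ c) := by
  obtain ⟨t, rfl⟩ := hpre
  rw [List.takeWhile_append]
  have hall : pc.takeWhile (· ≠ c) = pc := by
    rw [List.takeWhile_eq_self_iff]
    intro x hx
    simp
    intro hxc
    exact hnc (hxc ▸ hx)
  rw [if_pos (by rw [hall])]
  exact ⟨_, rfl⟩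

theorem isIn_nil_of_ne {pc : List Char} (hne : pc ≠ []) :
    PySem.Chars.isIn pc [] = false := by
  rw [PySem.Chars.isIn_eq_false_iff]
  intro h
  exact hne (List.eq_nil_of_infix_nil h)

theorem first_line_spec (pc : List Char) (hne : pc ≠ []) (hnl : '\n' ∉ pc) :
    ∀ (cs : List Char) (p : Nat), PySem.Chars.find cs pc = (p : Int) →
      (cs.take p).count '\n' < (pvSplit '\n' cs).length ∧
      PySem.Chars.isIn pc ((pvSplit '\n' cs).getD ((cs.take p).count '\n') []) = true ∧
      ∀ j < (cs.take p).count '\n', PySem.Chars.isIn pc ((pvSplit '\n' cs).getD j []) = false := by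
  intro cs
  induction cs with
  | nil =>
    intro p hfind
    exfalso
    have : PySem.Chars.find [] pc = -1 := by
      rw [PySem.Chars.find_eq_neg_one_iff]
      intro h
      exact hne (List.eq_nil_of_infix_nil h)
    rw [this] at hfind
    omega
  | cons a rest ih =>
    intro p hfind
    by_cases hpfx : pc <+: (a :: rest)
    · have h0 : PySem.Chars.find (a :: rest) pc = ((0 : Nat) : Int) :=
        find_eq_intro _ pc 0 (by simpa using hpfx) (by omega)
      have hp0 : p = 0 := by rw [h0] at hfind; omega
      subst hp0
      simp only [List.take_zero, List.count_nil]
      refine ⟨by rw [length_pvSplit]; omega, ?_, by omega⟩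
      rw [pvSplit_head]
      rw [PySem.Chars.isIn_iff_infix]
      exact (prefix_takeWhile '\n' hpfx hnl).isInfix
    · obtain ⟨hp1, hrest⟩ := find_tail a rest pc p hpfx hfind
      obtain ⟨ihlen, ihhit, ihmiss⟩ := ih (p - 1) hrest
      have htake : (a :: rest).take p = a :: rest.take (p - 1) := by
        cases p with
        | zero => omega
        | succ q => simp
      by_cases hanl : a = '\n'
      · subst hanl
        have hcount : (('\n' :: rest).take p).count '\n' = (rest.take (p - 1)).count '\n' + 1 := by
          rw [show ('\n' :: rest).take p = '\n' :: rest.take (p - 1) from htake]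
          simp
        rw [hcount]
        simp only [pvSplit, if_true]
        refine ⟨by rw [length_pvSplit] at ihlen; simp only [List.length_cons, length_pvSplit]; omega, ?_, ?_⟩
        · simpa using ihhit
        · intro j hj
          cases j with
          | zero => simpa using isIn_nil_of_ne hne
          | succ k => simpa using ihmiss k (by omega)
      · have hcount : ((a :: rest).take p).count '\n' = (rest.take (p - 1)).count '\n' := by
          rw [htake]
          simp [hanl]
        rw [hcount]
        obtain ⟨h, t, hht⟩ : ∃ h t, pvSplit '\n' rest = h :: t := by
          cases hp : pvSplit '\n' rest with
          | nil => exact absurd hp (pvSplit_ne_nil _ rest)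
          | cons h t => exact ⟨h, t, rfl⟩
        have hsplit : pvSplit '\n' (a :: rest) = (a :: h) :: t := by
          simp only [pvSplit, if_neg hanl, hht, List.modifyHead_cons]
        rw [hsplit]
        rw [hht] at ihlen ihhit ihmiss
        refine ⟨by simpa using ihlen, ?_, ?_⟩
        · cases hli : (rest.take (p - 1)).count '\n' with
          | zero =>
            rw [hli] at ihhit
            simp only [List.getD_cons_zero] at ihhit ⊢
            rw [PySem.Chars.isIn_iff_infix] at ihhit ⊢
            rw [List.infix_cons_iff]
            exact Or.inr ihhit
          | succ k =>
            rw [hli] at ihhit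
            simpa using ihhit
        · intro j hj
          cases j with
          | zero =>
            simp only [List.getD_cons_zero]
            rw [PySem.Chars.isIn_eq_false_iff]
            intro hinf
            rcases List.infix_cons_iff.mp hinf with hpf | hinf'
            · -- pc <+: a :: h, and a :: h <+: a :: rest since h = takeWhile
              have hh : h = rest.takeWhile (· ≠ '\n') := by
                have := pvSplit_head '\n' rest
                rw [hht] at this
                simpa using this
              have : (a :: h) <+: (a :: rest) := by
                rw [hh]
                exact List.cons_prefix_cons.mpr ⟨rfl, List.takeWhile_prefix _⟩
              exact hpfx (hpf.trans this)
            · have := ihmiss 0 (by omega)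
              simp only [List.getD_cons_zero] at this
              rw [PySem.Chars.isIn_eq_false_iff] at this
              exact this hinf'
          | succ k =>
            simpa using ihmiss (k + 1) (by omega)

theorem pvAFind_no_match (pc : List Char) (all : List (List Char)) (elist : List (Int × List Char))
    (h : ∀ q ∈ elist, PySem.Chars.isIn pc q.2 = false) : pvAFind pc all elist = [] := by
  induction elist with
  | nil => rfl
  | cons q rest ih =>
    obtain ⟨i, line⟩ := q
    simp only [pvAFind]
    rw [if_neg (by simpa using h (i, line) (by simp))]
    exact ih (fun q hq => h q (by simp [hq]))

theorem pvAFind_enum (pc : List Char) (all lines : List (List Char)) (li : Nat)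
    (hlt : li < lines.length)
    (hhit : PySem.Chars.isIn pc (lines.getD li []) = true)
    (hmiss : ∀ j < li, PySem.Chars.isIn pc (lines.getD j []) = false) :
    ∀ k : Nat, k ≤ li →
      pvAFind pc all (PySem.List.enumerate (lines.drop k) (k : Int)) =
        PySem.List.slice all (some (max 0 (li : Int))) (some (min (all.length : Int) ((li : Int) + 8))) := by
  have main : ∀ n k, k ≤ li → li - k = n →
      pvAFind pc all (PySem.List.enumerate (lines.drop k) (k : Int)) =
        PySem.List.slice all (some (max 0 (li : Int))) (some (min (all.length : Int) ((li : Int) + 8))) := by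
    intro n
    induction n with
    | zero =>
      intro k hk hlik
      have hkli : k = li := by omega
      subst hkli
      rw [List.drop_eq_getElem_cons hlt]
      simp only [PySem.List.enumerate]
      rw [show lines[k] = lines.getD k [] from (List.getD_eq_getElem lines [] hlt).symm]
      simp only [pvAFind, if_pos hhit]
    | succ n ihn =>
      intro k hk hlik
      have hklt : k < lines.length := by omega
      rw [List.drop_eq_getElem_cons hklt]
      simp only [PySem.List.enumerate]
      rw [show lines[k] = lines.getD k [] from (List.getD_eq_getElem lines [] hklt).symm]
      simp only [pvAFind]
      rw [if_neg (by simp only [hmiss k (by omega)]; simp)]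
      rw [show (k : Int) + 1 = ((k + 1 : Nat) : Int) by push_cast; ring]
      exact ihn (k + 1) (by omega) (by omega)
  intro k hk
  exact main (li - k) k hk rfl

theorem enumerate_mem {α : Type} (xs : List α) (s : Int) (q : Int × α) (hq : q ∈ PySem.List.enumerate xs s) : q.2 ∈ xs := by
  induction xs generalizing s with
  | nil => simp [PySem.List.enumerate] at hq
  | cons a rest ih =>
    simp only [PySem.List.enumerate, List.mem_cons] at hq
    rcases hq with hq | hq
    · simp [hq]
    · exact List.mem_cons_of_mem _ (ih (s + 1) hq)

theorem take_min_eight {α : Type} (all : List α) (li : Nat) :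
    (all.drop li).take (min all.length (li + 8) - li) = (all.drop li).take 8 := by
  rw [List.take_eq_take_iff]
  simp [List.length_drop]
  omega

theorem isIn_getD_false_of_mem_sep (pc : List Char) (hne : pc ≠ []) (hnl : '\n' ∈ pc)
    (cs : List Char) (j : Nat) :
    PySem.Chars.isIn pc ((pvSplit '\n' cs).getD j []) = false := by
  by_cases hj : j < (pvSplit '\n' cs).length
  · rw [List.getD_eq_getElem _ _ hj]
    rw [PySem.Chars.isIn_eq_false_iff]
    intro hinf
    exact pvSplit_no_sep '\n' cs _ (List.getElem_mem hj) (hinf.subset hnl)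
  · rw [List.getD_eq_default _ _ (by omega)]
    exact isIn_nil_of_ne hne

-- ===== VERDICT (by name: the statement is the Claim_ definition above) =====
theorem extract_quantity_context_lines_spec : Claim_equal_extract_quantity_context_lines := by
  intro text pc _
  unfold Spec_extract_quantity_context_lines
  unfold extract_quantity_context_lines extract_quantity_context_lines_alt
  by_cases hguard : text = "" ∨ pc = ""
  · rw [if_pos hguard, if_pos hguard]
  rw [if_neg hguard, if_neg hguard]
  simp only []
  by_cases hfneg : PySem.Str.find text pc = -1
  · rw [if_pos hfneg, if_pos hfneg]
  rw [if_neg hfneg, if_neg hfneg]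
  have hpcne : pc.toList ≠ [] := by
    intro h
    exact hguard (Or.inr (String.toList_eq_nil_iff.mp h))
  have hnn : 0 ≤ PySem.Str.find text pc := by
    have := PySem.Chars.neg_one_le_find (s := text.toList) (sub := pc.toList)
    rw [PySem.Str.find_eq] at hfneg ⊢
    omega
  obtain ⟨p, hp⟩ : ∃ p : Nat, PySem.Str.find text pc = (p : Int) :=
    ⟨(PySem.Str.find text pc).toNat, by omega⟩
  have hfc : PySem.Chars.find text.toList pc.toList = (p : Int) := by
    rw [← PySem.Str.find_eq]; exact hp
  -- B's line index = number of newlines before the first occurrence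
  have hli : PySem.Chars.count (PySem.Chars.slice text.toList none (some (PySem.Str.find text pc))) ['\n']
      = (text.toList.take p).count '\n' := by
    rw [hp, PySem.Chars.slice_eq_listSlice, PySem.List.slice_to _ (by positivity)]
    rw [count_single]
    simp
  rw [splitOn_eq_pvSplit]
  by_cases hnl : '\n' ∈ pc.toList
  · -- the code spans a line break: no single line contains it; both sides return []
    have hA : pvAFind pc.toList (pvSplit '\n' text.toList)
        (PySem.List.enumerate (pvSplit '\n' text.toList)) = [] := by
      apply pvAFind_no_match
      intro q hq
      have hmem := enumerate_mem _ _ _ hq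
      rw [PySem.Chars.isIn_eq_false_iff]
      intro hinf
      exact pvSplit_no_sep '\n' text.toList _ hmem (hinf.subset hnl)
    rw [hA]
    have hB : PySem.Chars.isIn pc.toList
        (PySem.List.pyGetD (pvSplit '\n' text.toList)
          ((PySem.Chars.count (PySem.Chars.slice text.toList none (some (PySem.Str.find text pc))) ['\n'] : Nat) : Int) []) = false := by
      rw [PySem.List.pyGetD_natCast]
      exact isIn_getD_false_of_mem_sep pc.toList hpcne hnl text.toList _
    rw [hB]
    simp
  · -- the normal case: B's index is exactly the first matching line
    obtain ⟨hlen, hhit, hmiss⟩ := first_line_spec pc.toList hpcne hnl text.toList p hfc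
    have hB : PySem.Chars.isIn pc.toList
        (PySem.List.pyGetD (pvSplit '\n' text.toList)
          ((PySem.Chars.count (PySem.Chars.slice text.toList none (some (PySem.Str.find text pc))) ['\n'] : Nat) : Int) []) = true := by
      rw [PySem.List.pyGetD_natCast, hli]
      exact hhit
    rw [hB]
    have hA := pvAFind_enum pc.toList (pvSplit '\n' text.toList) (pvSplit '\n' text.toList)
      ((text.toList.take p).count '\n') hlen hhit hmiss 0 (by omega)
    simp only [List.drop_zero, Nat.cast_zero] at hA
    rw [hA]
    simp only [Bool.not_true, Bool.false_eq_true, if_false, hli]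
    -- the two slices coincide
    congr 1
    congr 1
    set li := (text.toList.take p).count '\n' with hlidef
    set all := pvSplit '\n' text.toList with halldef
    have h1 : max 0 (li : Int) = ((li : Nat) : Int) := by omega
    have h2 : min (all.length : Int) ((li : Int) + 8) = ((min all.length (li + 8) : Nat) : Int) := by
      push_cast; omega
    rw [h1, h2, PySem.List.slice_natCast]
    rw [show ((li : Int) + 8) = ((li + 8 : Nat) : Int) by push_cast; ring]
    rw [PySem.List.slice_natCast]
    rw [show li + 8 - li = 8 by omega]
    exact take_min_eight all li
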